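-- pv_equiv track=rewrite | github.com/flo-bou/adventofcode24 | day6/day6_part1.py | to_West
-- ===== SOURCE A (Python) =====
-- def to_West(carte: list, guard_position: list):
--     # trouver le prochain '#' dans la direction de déplacement du garde
--     positions_traveled: set = set()
--     after_guard: bool = False
--     final_guard_position: list = list()
--     for char_index, char in reversed(list(enumerate(carte[guard_position[0]]))):
--         # trouver la position du garde sur la ligne :
--         if char_index == guard_position[1]:
--             after_guard = True
--             continue
--         if after_guard:
--             if char == "#":
--                 final_guard_position = [guard_position[0], char_index+1]
--                 break
--             else:
--                 positions_traveled.add((guard_position[0], char_index))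
--     # # si aucun '#' n'a été atteint, alors le garde est sorti de la carte
--     # if final_guard_position == []:
--     #     final_guard_position = None
--     return final_guard_position, "North", positions_traveled
-- ===== SOURCE B (Python) =====
-- def to_West(carte, guard_position):
--     # Two-phase rewrite: locate the nearest wall to the west once, then build the
--     # traveled set from a closed-form range instead of a flag-driven scan.
--     r = guard_position[0]
--     col = guard_position[1]
--     row = carte[r]
--     if not (0 <= col < len(row)):
--         return [], "North", set()
--     west = row[:col][::-1]  # cells west of the guard, nearest first
--     if "#" in west:
--         wall = col - 1 - west.index("#")
--     else:
--         wall = -1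
--     positions_traveled = {(r, c) for c in range(col - 1, wall, -1)}
--     final_guard_position = [r, wall + 1] if wall != -1 else []
--     return final_guard_position, "North", positions_traveled
-- ===== Notes on version B (the rewrite author's own statement) =====
-- stated objective: idiomatic
-- what changed: A's single reverse scan with an after_guard flag (skipping cells east of the guard, then collecting until a wall) is replaced by a two-phase decomposition: locate the nearest western wall once via reversed-prefix .index('#'), then produce the traveled cells as a closed-form range comprehension and the final position by one arithmetic expression.
-- outside the precondition, e.g. on to_West([[]], [0]): A returns ([], 'North', set()), B raises IndexError
import Mathlib
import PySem

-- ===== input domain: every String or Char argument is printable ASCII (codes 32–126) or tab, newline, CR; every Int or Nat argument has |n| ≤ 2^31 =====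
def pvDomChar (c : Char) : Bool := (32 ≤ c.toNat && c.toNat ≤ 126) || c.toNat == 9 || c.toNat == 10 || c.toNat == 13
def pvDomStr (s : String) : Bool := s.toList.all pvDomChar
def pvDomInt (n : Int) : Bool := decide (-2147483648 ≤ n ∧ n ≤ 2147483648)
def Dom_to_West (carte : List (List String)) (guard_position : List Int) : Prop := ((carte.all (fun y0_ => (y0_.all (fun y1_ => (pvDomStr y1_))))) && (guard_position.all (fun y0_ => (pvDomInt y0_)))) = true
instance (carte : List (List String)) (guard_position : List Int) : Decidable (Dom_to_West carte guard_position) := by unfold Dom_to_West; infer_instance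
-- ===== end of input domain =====

-- B replaces A's flag-driven reverse scan by a two-phase decomposition (find the nearest
-- western wall once, then emit the traveled cells as a closed-form range); objective: idiomatic.


-- ===== PORT A =====
-- the for-loop over reversed(list(enumerate(row))) with its after_guard flag, break and set.add
def westLoopA (g0 g1 : Int) : List (Int × String) → Bool → List Int → List (Int × Int) → List Int × List (Int × Int)
  | [], _, fin, pos => (fin, pos)
  | (i, ch) :: rest, after, fin, pos =>
    if i = g1 then westLoopA g0 g1 rest true fin pos
    else if after then
      if ch = "#" then ([g0, i + 1], pos)
      else westLoopA g0 g1 rest after fin (PySem.Set.add pos (g0, i))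
    else westLoopA g0 g1 rest after fin pos

def to_West (carte : List (List String)) (guard_position : List Int) : List Int × String × (List (Int × Int)) :=
  match PySem.List.pyGet? guard_position 0 with
  | none => ([], "North", [])
  | some g0 =>
    match PySem.List.pyGet? carte g0 with
    | none => ([], "North", [])
    | some row =>
      match PySem.List.pyGet? guard_position 1 with
      | none => ([], "North", [])
      | some g1 =>
        let res := westLoopA g0 g1 (PySem.List.enumerate row).reverse false [] []
        (res.1, "North", res.2)

-- ===== PORT B =====
def to_West_alt (carte : List (List String)) (guard_position : List Int) : List Int × String × (List (Int × Int)) :=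
  match PySem.List.pyGet? guard_position 0 with
  | none => ([], "North", [])
  | some r =>
    match PySem.List.pyGet? guard_position 1 with
    | none => ([], "North", [])
    | some col =>
      match PySem.List.pyGet? carte r with
      | none => ([], "North", [])
      | some row =>
        if 0 ≤ col ∧ col < (row.length : Int) then
          -- west = row[:col][::-1] : cells west of the guard, nearest first
          let west := (PySem.List.slice row none (some col)).reverse
          let wall : Int :=
            match PySem.List.index? west "#" with
            | some d => col - 1 - (d : Int)
            | none => -1
          let positions := PySem.Set.ofList ((PySem.List.pyRange (col - 1) wall (-1)).map (fun c => (r, c)))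
          ((if wall ≠ -1 then [r, wall + 1] else []), "North", positions)
        else ([], "North", [])

-- ===== PRECONDITION & SPEC =====
-- Pre_ excludes inputs where A raises IndexError (guard_position shorter than 2, or
-- guard_position[0] not a valid Python index into carte); with a 1-entry guard_position and an
-- EMPTY selected row A happens to return empty results (the loop never reads guard_position[1])
-- while B raises, so that accidental corner is excluded too (see the cite).
def Pre_to_West (carte : List (List String)) (guard_position : List Int) : Prop :=
  2 ≤ guard_position.length ∧ (PySem.List.pyGet? carte (guard_position.getD 0 0)).isSome = true
instance (carte : List (List String)) (guard_position : List Int) : Decidable (Pre_to_West carte guard_position) := by unfold Pre_to_West; infer_instance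

def pvWitness_to_West : List (List String) × List Int := ([[".", "#", ".", "."]], [0, 3])

def Spec_to_West (carte : List (List String)) (guard_position : List Int) (out : List Int × String × (List (Int × Int))) : Prop := out = to_West_alt carte guard_position
instance (carte : List (List String)) (guard_position : List Int) (out : List Int × String × (List (Int × Int))) : Decidable (Spec_to_West carte guard_position out) := by unfold Spec_to_West; infer_instance

-- ===== CLAIM (what is proved, stated in full; the proofs are below) =====
def Claim_equal_to_West : Prop := ∀ (carte : List (List String)) (guard_position : List Int), Dom_to_West carte guard_position → Pre_to_West carte guard_position → Spec_to_West carte guard_position (to_West carte guard_position)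

-- ===== LEMMAS AND PROOFS =====

-- descending index/char pairs (n-1, c0), (n-2, c1), … : the shape of reversed(enumerate(row))
def pairsDown : Int → List String → List (Int × String)
  | _, [] => []
  | n, c :: w => (n - 1, c) :: pairsDown (n - 1) w

theorem pairsDown_append (u v : List String) : ∀ n, pairsDown n (u ++ v) = pairsDown n u ++ pairsDown (n - u.length) v := by
  induction u with
  | nil => intro n; simp [pairsDown]
  | cons c w ih =>
    intro n
    simp only [List.cons_append, pairsDown, ih (n - 1), List.length_cons]
    have h : n - 1 - (w.length : Int) = n - ((w.length : Int) + 1) := by omega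
    push_cast
    rw [h]

theorem mem_pairsDown (p : Int × String) : ∀ (u : List String) (n : Int), p ∈ pairsDown n u → n - u.length ≤ p.1 ∧ p.1 < n := by
  intro u
  induction u with
  | nil => intro n h; simp [pairsDown] at h
  | cons c w ih =>
    intro n h
    simp only [pairsDown, List.mem_cons] at h
    rcases h with h | h
    · subst h; simp only [List.length_cons]; push_cast; constructor <;> omega
    · have := ih (n - 1) h
      simp only [List.length_cons]
      push_cast
      push_cast at this
      omega

theorem enum_rev (pre : List String) : ∀ s : Int, (PySem.List.enumerate pre s).reverse = pairsDown (s + pre.length) pre.reverse := by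
  induction pre with
  | nil => intro s; simp [PySem.List.enumerate_nil, pairsDown]
  | cons x xs ih =>
    intro s
    rw [PySem.List.enumerate_cons]
    simp only [List.reverse_cons, ih (s + 1), pairsDown_append, pairsDown, List.length_reverse, List.length_cons]
    push_cast
    have hA : s + 1 + (xs.length : Int) = s + ((xs.length : Int) + 1) := by omega
    have hC : s + ((xs.length : Int) + 1) - (xs.length : Int) - 1 = s := by omega
    rw [hA, hC]

theorem westLoopA_skip (g0 g1 : Int) : ∀ (l rest : List (Int × String)) (fin : List Int) (pos : List (Int × Int)), (∀ p ∈ l, p.1 ≠ g1) → westLoopA g0 g1 (l ++ rest) false fin pos = westLoopA g0 g1 rest false fin pos := by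
  intro l
  induction l with
  | nil => intro rest fin pos _; rfl
  | cons p l ih =>
    intro rest fin pos h
    obtain ⟨i, ch⟩ := p
    have hi : i ≠ g1 := h (i, ch) (by simp)
    simp only [List.cons_append, westLoopA, if_neg hi, if_neg (Bool.false_ne_true)]
    exact ih rest fin pos (fun q hq => h q (List.mem_cons_of_mem _ hq))

theorem westLoopA_phase2 (g0 g1 : Int) : ∀ (west : List String) (n : Int) (fin : List Int) (acc : List (Int × Int)),
    (west.length : Int) = n → n ≤ g1 → (∀ c, (g0, c) ∈ acc → n ≤ c) →
    westLoopA g0 g1 (pairsDown n west) true fin acc =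
      (match PySem.List.index? west "#" with
       | some d => ([g0, n - (d : Int)], acc ++ (PySem.List.pyRange (n - 1) (n - 1 - (d : Int)) (-1)).map (fun c => (g0, c)))
       | none => (fin, acc ++ (PySem.List.pyRange (n - 1) (-1) (-1)).map (fun c => (g0, c)))) := by
  intro west
  induction west with
  | nil =>
    intro n fin acc hlen _ _
    have hn : n = 0 := by simpa using hlen.symm
    subst hn
    simp [pairsDown, westLoopA, PySem.List.index?]
  | cons ch w ih =>
    intro n fin acc hlen hle hacc
    have hn : n = (w.length : Int) + 1 := by simpa using hlen.symm
    have hne : n - 1 ≠ g1 := by omega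
    have hstep : westLoopA g0 g1 (pairsDown n (ch :: w)) true fin acc
        = if ch = "#" then ([g0, (n - 1) + 1], acc)
          else westLoopA g0 g1 (pairsDown (n - 1) w) true fin (PySem.Set.add acc (g0, n - 1)) := by
      simp [pairsDown, westLoopA, hne]
    by_cases hch : ch = "#"
    · subst hch
      rw [hstep, if_pos rfl,
        show PySem.List.index? ("#" :: w) "#" = some 0 from PySem.List.index?_cons_self _ _]
      have h00 : ((0 : Nat) : Int) = 0 := rfl
      simp only [h00, sub_zero, PySem.List.pyRange_neg_one_eq_nil (le_refl (n - 1)),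
        List.map_nil, List.append_nil]
      have hnn : n - 1 + 1 = n := by omega
      rw [hnn]
    · rw [hstep, if_neg hch, PySem.List.index?_cons_of_ne w hch]
      have hnotmem : (g0, n - 1) ∉ acc := fun h => by have := hacc _ h; omega
      rw [PySem.Set.add_of_not_mem hnotmem]
      rw [ih (n - 1) fin (acc ++ [(g0, n - 1)]) (by omega) (by omega)
            (by intro c hc
                simp only [List.mem_append, List.mem_singleton, Prod.mk.injEq] at hc
                rcases hc with h | ⟨_, rfl⟩
                · have := hacc c h; omega
                · omega)]
      cases hidx : PySem.List.index? w "#" with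
      | some d =>
        simp only [Option.map_some]
        push_cast
        have h1 : n - 1 - 1 - (d : Int) = n - 1 - ((d : Int) + 1) := by omega
        have h2 : n - 1 - (d : Int) = n - ((d : Int) + 1) := by omega
        rw [h1, h2,
          PySem.List.pyRange_neg_one_cons (by omega : n - 1 - ((d : Int) + 1) < n - 1),
          List.map_cons, List.append_cons]
        simp
      | none =>
        simp only [Option.map_none]
        rw [PySem.List.pyRange_neg_one_cons (by omega : (-1 : Int) < n - 1),
          List.map_cons, List.append_cons]
        simp

theorem prodmk_injective (g0 : Int) : Function.Injective (fun c : Int => (g0, c)) := by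
  intro a b h
  simpa using h

theorem ofList_map_pyRange_neg (g0 a b : Int) :
    PySem.Set.ofList ((PySem.List.pyRange a b (-1)).map (fun c => (g0, c)))
      = (PySem.List.pyRange a b (-1)).map (fun c => (g0, c)) := by
  apply PySem.Set.ofList_eq_self_of_nodup
  apply List.Nodup.map (prodmk_injective g0)
  rw [PySem.List.pyRange_neg_one_eq_reverse]
  exact List.nodup_reverse.mpr (PySem.List.nodup_pyRange_one _ _)

-- ===== VERDICT (by name: the statement is the Claim_ definition above) =====
theorem to_West_spec : Claim_equal_to_West := by
  intro carte gp _hdom hpre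
  unfold Spec_to_West
  obtain ⟨hlen, hidx⟩ := hpre
  obtain ⟨g0, g1, rest, rfl⟩ : ∃ g0 g1 r, gp = g0 :: g1 :: r := by
    cases gp with
    | nil => simp at hlen
    | cons a t =>
      cases t with
      | nil => simp at hlen
      | cons b r => exact ⟨a, b, r, rfl⟩
  have h0 : PySem.List.pyGet? (g0 :: g1 :: rest) (0 : Int) = some g0 := by simp [pysem]
  have h1 : PySem.List.pyGet? (g0 :: g1 :: rest) (1 : Int) = some g1 := by simp [pysem]
  have hidx' : (PySem.List.pyGet? carte g0).isSome = true := by simpa using hidx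
  obtain ⟨row, hrow⟩ := Option.isSome_iff_exists.mp hidx'
  simp only [to_West, to_West_alt, h0, h1, hrow]
  have henum : (PySem.List.enumerate row).reverse = pairsDown (row.length : Int) row.reverse := by
    rw [enum_rev row 0]; norm_num
  by_cases hcol : 0 ≤ g1 ∧ g1 < (row.length : Int)
  · -- the guard column is a real index: decompose the row around it
    rw [if_pos hcol]
    obtain ⟨hc0, hc1⟩ := hcol
    set j : Nat := g1.toNat with hjdef
    have hj : (j : Int) = g1 := Int.toNat_of_nonneg hc0
    have hjlen : j < row.length := by omega
    have hdecomp : row.reverse = (row.drop (j + 1)).reverse ++ row[j] :: (row.take j).reverse := by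
      conv_lhs => rw [← List.take_append_drop j row, ← List.getElem_cons_drop hjlen]
      simp
    have hlen2 : ((row.drop (j + 1)).reverse.length : Int) = (row.length : Int) - ((j : Int) + 1) := by
      simp; omega
    have hsplit : pairsDown (row.length : Int) row.reverse
        = pairsDown (row.length : Int) ((row.drop (j + 1)).reverse)
          ++ ((j : Int), row[j]) :: pairsDown (j : Int) ((row.take j).reverse) := by
      rw [hdecomp, pairsDown_append]
      congr 1
      rw [show (row.length : Int) - ((row.drop (j + 1)).reverse.length : Int) = (j : Int) + 1 by omega]
      simp [pairsDown]
    have hskip : ∀ p ∈ pairsDown (row.length : Int) ((row.drop (j + 1)).reverse), p.1 ≠ g1 := by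
      intro p hp
      have := mem_pairsDown p _ _ hp
      omega
    rw [henum, hsplit, westLoopA_skip g0 g1 _ _ [] [] hskip]
    have hg1 : ((j : Int), row[j]).1 = g1 := hj
    rw [show westLoopA g0 g1 (((j : Int), row[j]) :: pairsDown (j : Int) ((row.take j).reverse)) false [] []
          = westLoopA g0 g1 (pairsDown (j : Int) ((row.take j).reverse)) true [] [] by
        simp [westLoopA, hj]]
    rw [westLoopA_phase2 g0 g1 ((row.take j).reverse) (j : Int) [] []
          (by simp; omega) (by omega) (by simp)]
    have hwest : (PySem.List.slice row none (some g1)).reverse = (row.take j).reverse := by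
      rw [PySem.List.slice_to row hc0]
    rw [hwest]
    cases hfind : PySem.List.index? ((row.take j).reverse) "#" with
    | some d =>
      obtain ⟨hdlt, -, -⟩ := PySem.List.getElem_of_index?_eq_some hfind
      have hdj : d < j := by simpa [min_eq_left (Nat.le_of_lt hjlen)] using hdlt
      have hwall : g1 - 1 - (d : Int) ≠ -1 := by omega
      simp only [if_pos hwall, ofList_map_pyRange_neg]
      rw [hj]
      have harith : g1 - 1 - (d : Int) + 1 = g1 - (d : Int) := by omega
      rw [harith]
      simp
    | none =>
      simp only [ite_not, ofList_map_pyRange_neg]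
      rw [hj]
      simp
  · -- guard column out of range: A's flag is never set, B's guard rejects
    rw [if_neg hcol]
    rw [henum, show pairsDown (row.length : Int) row.reverse
          = pairsDown (row.length : Int) row.reverse ++ [] by simp,
      westLoopA_skip g0 g1 _ _ [] []
        (by intro p hp
            have := mem_pairsDown p _ _ hp
            simp at this
            omega)]
    rfl
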